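-- pv_equiv track=rewrite | github.com/yakultbottle/Advent-of-Code | 2024/day_22/part1.py | find_secret
-- ===== SOURCE A (Python) =====
-- modulo = 0xFFFFFF # 2^24
--
-- def find_secret(secret: int, depth: int) -> int:
--     next_secret = secret
--     for _ in range(depth):
--         next_secret ^= (next_secret << 6) # * 64
--         next_secret &= modulo
--         next_secret ^= (next_secret >> 5) # / 32
--         next_secret &= modulo
--         next_secret ^= (next_secret << 11) # * 2048
--         next_secret &= modulo
--     return next_secret
-- ===== SOURCE B (Python) =====
-- M = 16777215  # low 24 bits
--
--
-- def _step(x):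
--     x = (x ^ (x << 6)) & M
--     x = (x ^ (x >> 5)) & M
--     x = (x ^ (x << 11)) & M
--     return x
--
--
-- def _apply(cols, x):
--     y = 0
--     for i in range(24):
--         if (x >> i) & 1:
--             y ^= cols[i]
--     return y
--
--
-- def find_secret(secret: int, depth: int) -> int:
--     if depth <= 0:
--         return secret
--     base = [_step(1 << i) for i in range(24)]  # step as a GF(2) matrix, one column mask per bit
--     x = secret % 16777216
--     e = depth
--     while e:
--         if e & 1:
--             x = _apply(base, x)
--         base = [_apply(base, c) for c in base]
--         e >>= 1
--     return x
-- ===== Notes on version B (the rewrite author's own statement) =====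
-- stated objective: faster
-- what changed: A iterates the 24-bit xorshift step depth times; B treats the step as a linear map over GF(2) on 24-bit states (24 column bit-masks), raises it to the depth-th power by squaring, and applies it to the seed's low 24 bits.
import Mathlib
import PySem

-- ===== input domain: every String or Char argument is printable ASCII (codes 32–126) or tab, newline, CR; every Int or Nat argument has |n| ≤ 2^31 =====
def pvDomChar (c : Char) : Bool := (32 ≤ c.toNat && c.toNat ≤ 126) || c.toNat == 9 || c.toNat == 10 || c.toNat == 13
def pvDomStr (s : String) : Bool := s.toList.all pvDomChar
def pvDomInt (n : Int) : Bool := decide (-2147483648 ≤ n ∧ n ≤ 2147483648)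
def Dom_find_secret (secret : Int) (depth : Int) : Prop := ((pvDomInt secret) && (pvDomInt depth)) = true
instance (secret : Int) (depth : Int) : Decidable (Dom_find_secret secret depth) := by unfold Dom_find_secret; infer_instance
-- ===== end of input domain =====

-- B replaces A's depth-long iteration of the 24-bit xorshift step by exponentiation by
-- squaring of the step's GF(2) matrix (24 column bit-masks), applied to the seed's low 24 bits.

-- ===== PORT A =====
-- literal port of A's loop: `for _ in range(depth)` over the six update statements
def find_secret (secret : Int) (depth : Int) : Int :=
  (PySem.List.pyRange 0 depth 1).foldl
    (fun next_secret _ =>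
      let s1 := PySem.Int.band (PySem.Int.bxor next_secret (next_secret <<< (6 : Nat))) 16777215
      let s2 := PySem.Int.band (PySem.Int.bxor s1 (s1 >>> (5 : Nat))) 16777215
      PySem.Int.band (PySem.Int.bxor s2 (s2 <<< (11 : Nat))) 16777215)
    secret

-- ===== PORT B =====
-- Source B's _step
def pvStep (x : Int) : Int :=
  let s1 := PySem.Int.band (PySem.Int.bxor x (x <<< (6 : Nat))) 16777215
  let s2 := PySem.Int.band (PySem.Int.bxor s1 (s1 >>> (5 : Nat))) 16777215
  PySem.Int.band (PySem.Int.bxor s2 (s2 <<< (11 : Nat))) 16777215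

-- Source B's _apply: `cols[i]` is always in range (cols always has 24 entries), hence getD;
-- x is non-negative at every call, so `if (x >> i) & 1:` is the test `== 1`
def pvApply (cols : List Int) (x : Int) : Int :=
  (List.range 24).foldl
    (fun y (i : Nat) =>
      if PySem.Int.band (x >>> i) 1 == 1 then PySem.Int.bxor y (cols.getD i 0) else y) 0

-- Source B's `while e:` loop; e = depth > 0 here, and `e >>= 1` is e / 2 on Nat
def pvPowLoop (e : Nat) (base : List Int) (x : Int) : Int :=
  if e = 0 then x
  else pvPowLoop (e / 2) (base.map (pvApply base))
         (if e % 2 = 1 then pvApply base x else x)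

def find_secret_alt (secret : Int) (depth : Int) : Int :=
  if depth ≤ 0 then secret
  else pvPowLoop depth.toNat ((List.range 24).map (fun (i : Nat) => pvStep ((1 : Int) <<< i)))
         (PySem.Int.mod secret 16777216)

-- ===== PRECONDITION & SPEC =====
def Spec_find_secret (secret : Int) (depth : Int) (out : Int) : Prop := out = find_secret_alt secret depth
instance (secret : Int) (depth : Int) (out : Int) : Decidable (Spec_find_secret secret depth out) := by unfold Spec_find_secret; infer_instance

-- ===== CLAIM (what is proved, stated in full; the proofs are below) =====
def Claim_equal_find_secret : Prop := ∀ (secret : Int) (depth : Int), Dom_find_secret secret depth → Spec_find_secret secret depth (find_secret secret depth)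

-- ===== LEMMAS AND PROOFS =====

-- Nat-level model of one xorshift step on the low 24 bits
def natStep (s : Nat) : Nat :=
  let s1 := (s ^^^ s <<< 6) &&& 16777215
  let s2 := (s1 ^^^ s1 >>> 5) &&& 16777215
  (s2 ^^^ s2 <<< 11) &&& 16777215

lemma h24 (n : Nat) : n &&& 16777215 = n % 16777216 := by
  have := Nat.and_two_pow_sub_one_eq_mod n 24
  norm_num at this; exact this

lemma tN : (16777215 : Int).toNat = 16777215 := rfl

-- Python's `x & 0xFFFFFF` is `x mod 2^24`, also for negative x
lemma band_mask (x : Int) : PySem.Int.band x 16777215 = x % 16777216 := by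
  cases x with
  | ofNat m =>
    rw [show Int.ofNat m = (m : Int) from rfl, PySem.Int.band,
      if_pos (by positivity), if_pos (by norm_num), tN, Int.toNat_natCast, h24]
    omega
  | negSucc m =>
    rw [PySem.Int.band, if_neg (by simp), if_pos (by norm_num), tN,
      show (-Int.negSucc m - 1).toNat = m by rw [Int.negSucc_eq]; omega,
      Nat.and_comm, h24, Int.negSucc_eq]
    omega

lemma tb_sub {r : Nat} (hr : r < 16777216) (i : Nat) :
    (16777215 - r).testBit i = (decide (i < 24) && !r.testBit i) := by
  rw [show 16777215 - r = 2 ^ 24 - (r + 1) by omega]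
  exact Nat.testBit_two_pow_sub_succ (by norm_num; omega) i

lemma tb_mod (r i : Nat) : (r % 16777216).testBit i = (decide (i < 24) && r.testBit i) := by
  have := Nat.testBit_mod_two_pow r 24 i
  norm_num at this; exact this

lemma X1 (m n : Nat) : ((m % 16777216) ^^^ (n % 16777216)) % 16777216 = (m ^^^ n) % 16777216 := by
  apply Nat.eq_of_testBit_eq; intro i
  simp only [tb_mod, Nat.testBit_xor]
  by_cases h : i < 24 <;> simp [h]

lemma X2 (m n : Nat) :
    ((m % 16777216) ^^^ (16777215 - n % 16777216)) % 16777216 =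
      16777215 - (m ^^^ n) % 16777216 := by
  apply Nat.eq_of_testBit_eq; intro i
  simp only [tb_mod, Nat.testBit_xor, tb_sub (Nat.mod_lt _ (by norm_num))]
  by_cases h : i < 24 <;> simp [h]

lemma X3 (m n : Nat) :
    ((16777215 - m % 16777216) ^^^ (16777215 - n % 16777216)) % 16777216 =
      (m ^^^ n) % 16777216 := by
  apply Nat.eq_of_testBit_eq; intro i
  simp only [tb_mod, Nat.testBit_xor, tb_sub (Nat.mod_lt _ (by norm_num))]
  by_cases h : i < 24 <;> simp [h]

lemma negSucc_toNat (n : Nat) : (Int.negSucc n % 16777216).toNat = 16777215 - n % 16777216 := by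
  rw [Int.negSucc_eq]; omega

lemma natCast_toNat (n : Nat) : (((n : Int)) % 16777216).toNat = n % 16777216 := by omega

-- Python's `x ^ y` mod 2^24 only depends on x, y mod 2^24, also for negative x, y
lemma bxor_emod (x y : Int) :
    (PySem.Int.bxor x y) % 16777216 =
      ((((x % 16777216).toNat ^^^ (y % 16777216).toNat) % 16777216 : Nat) : Int) := by
  cases x with
  | ofNat m =>
    cases y with
    | ofNat n =>
      rw [show Int.ofNat m = (m : Int) from rfl, show Int.ofNat n = (n : Int) from rfl,
        PySem.Int.bxor, if_pos (by positivity), if_pos (by positivity),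
        Int.toNat_natCast, Int.toNat_natCast, natCast_toNat, natCast_toNat, X1]
      omega
    | negSucc n =>
      rw [show Int.ofNat m = (m : Int) from rfl, PySem.Int.bxor,
        if_pos (by positivity), if_neg (by simp),
        Int.toNat_natCast, show (-Int.negSucc n - 1).toNat = n by rw [Int.negSucc_eq]; omega,
        natCast_toNat, negSucc_toNat, X2]
      omega
  | negSucc m =>
    cases y with
    | ofNat n =>
      rw [show Int.ofNat n = (n : Int) from rfl, PySem.Int.bxor,
        if_neg (by simp), if_pos (by positivity),
        Int.toNat_natCast, show (-Int.negSucc m - 1).toNat = m by rw [Int.negSucc_eq]; omega,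
        natCast_toNat, negSucc_toNat, Nat.xor_comm (16777215 - m % 16777216), X2,
        Nat.xor_comm n m]
      omega
    | negSucc n =>
      rw [PySem.Int.bxor, if_neg (by simp), if_neg (by simp),
        show (-Int.negSucc m - 1).toNat = m by rw [Int.negSucc_eq]; omega,
        show (-Int.negSucc n - 1).toNat = n by rw [Int.negSucc_eq]; omega,
        negSucc_toNat, negSucc_toNat, X3]
      omega

lemma band_natCast' (a b : Nat) : PySem.Int.band (a : Int) (b : Int) = ((a &&& b : Nat) : Int) :=
  PySem.Int.band_natCast a b

-- the first masked stage over Int equals the Nat stage on the seed's low 24 bits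
lemma stage1_emod (x : Int) :
    PySem.Int.band (PySem.Int.bxor x (x <<< (6 : Nat))) 16777215 =
      (((x % 16777216).toNat ^^^ (x % 16777216).toNat <<< 6) &&& 16777215 : Nat) := by
  set s0 : Nat := (x % 16777216).toNat with hs0
  have htn : ((x <<< (6 : Nat)) % 16777216).toNat = (s0 <<< 6) % 16777216 := by
    rw [Int.shiftLeft_eq]
    have h1 : x * 2 ^ 6 % 16777216 = (s0 : Int) * 2 ^ 6 % 16777216 := by omega
    rw [h1, Nat.shiftLeft_eq]
    push_cast
    omega
  rw [band_mask, bxor_emod, htn, ← hs0]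
  congr 1
  rw [show (16777215 : Nat) = 2 ^ 24 - 1 by norm_num, Nat.and_two_pow_sub_one_eq_mod]
  apply Nat.eq_of_testBit_eq; intro i
  rw [show (16777216 : Nat) = 2 ^ 24 by norm_num]
  simp only [Nat.testBit_mod_two_pow, Nat.testBit_xor]
  by_cases h : i < 24 <;> simp [h]

lemma castL (a c : Nat) :
    PySem.Int.band (PySem.Int.bxor (a : Int) ((a : Int) <<< c)) 16777215 =
      (((a ^^^ a <<< c) &&& 16777215 : Nat) : Int) := by
  rw [← Int.natCast_shiftLeft, PySem.Int.bxor_natCast,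
    show (16777215 : Int) = ((16777215 : Nat) : Int) by norm_num, band_natCast']

lemma castR (a c : Nat) :
    PySem.Int.band (PySem.Int.bxor (a : Int) ((a : Int) >>> c)) 16777215 =
      (((a ^^^ a >>> c) &&& 16777215 : Nat) : Int) := by
  rw [← Int.natCast_shiftRight, PySem.Int.bxor_natCast,
    show (16777215 : Int) = ((16777215 : Nat) : Int) by norm_num, band_natCast']

-- the Int step is the Nat step on the low 24 bits of its argument
lemma step_emod (x : Int) : pvStep x = ((natStep (x % 16777216).toNat : Nat) : Int) := by
  simp only [pvStep, natStep]
  rw [stage1_emod, castR, castL]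

lemma step_cast (s : Nat) (hs : s < 16777216) : pvStep (s : Int) = ((natStep s : Nat) : Int) := by
  rw [step_emod, show (((s : Int)) % 16777216).toNat = s by omega]

lemma natStep_lt (s : Nat) : natStep s < 16777216 :=
  Nat.lt_succ_of_le Nat.and_le_right

lemma stL_lin (c a b : Nat) :
    ((a ^^^ b) ^^^ (a ^^^ b) <<< c) &&& 16777215 =
      (((a ^^^ a <<< c) &&& 16777215) ^^^ ((b ^^^ b <<< c) &&& 16777215)) := by
  apply Nat.eq_of_testBit_eq; intro i
  rw [show (16777215 : Nat) = 2 ^ 24 - 1 by norm_num]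
  simp only [Nat.testBit_and, Nat.testBit_xor, Nat.testBit_shiftLeft,
    Nat.testBit_two_pow_sub_one]
  by_cases h1 : i < 24 <;> by_cases h2 : c ≤ i <;>
    simp [h1, h2, ge_iff_le] <;>
    cases a.testBit i <;> cases b.testBit i <;>
    cases a.testBit (i - c) <;> cases b.testBit (i - c) <;> rfl

lemma stR_lin (c a b : Nat) :
    ((a ^^^ b) ^^^ (a ^^^ b) >>> c) &&& 16777215 =
      (((a ^^^ a >>> c) &&& 16777215) ^^^ ((b ^^^ b >>> c) &&& 16777215)) := by
  apply Nat.eq_of_testBit_eq; intro i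
  rw [show (16777215 : Nat) = 2 ^ 24 - 1 by norm_num]
  simp only [Nat.testBit_and, Nat.testBit_xor, Nat.testBit_shiftRight,
    Nat.testBit_two_pow_sub_one]
  by_cases h1 : i < 24 <;> simp [h1] <;>
    cases a.testBit i <;> cases b.testBit i <;>
    cases a.testBit (c + i) <;> cases b.testBit (c + i) <;> rfl

-- the step is linear over GF(2): it distributes over xor
lemma natStep_lin (a b : Nat) : natStep (a ^^^ b) = natStep a ^^^ natStep b := by
  simp only [natStep]
  rw [stL_lin 6 a b, stR_lin 5, stL_lin 11]

lemma M1 (x k : Nat) :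
    x % 2 ^ (k + 1) = if x.testBit k then x % 2 ^ k ^^^ 2 ^ k else x % 2 ^ k := by
  by_cases h : x.testBit k <;>
    (apply Nat.eq_of_testBit_eq; intro i;
     simp only [h, if_true, if_false, Nat.testBit_mod_two_pow, Nat.testBit_xor,
       Nat.testBit_two_pow];
     by_cases e1 : i = k)
  · subst e1; simp [h, (by omega : i < i + 1), (by omega : ¬ i < i)]
  · simp [decide_eq_false (show ¬ k = i from fun hh => e1 hh.symm),
      (by omega : (i < k + 1) ↔ i < k)]
  · subst e1; simp [h, (by omega : i < i + 1), (by omega : ¬ i < i)]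
  · simp [decide_eq_false (show ¬ k = i from fun hh => e1 hh.symm),
      (by omega : (i < k + 1) ↔ i < k)]

lemma cond_iff (x k : Nat) : ((x >>> k) &&& 1 = 1) ↔ x.testBit k := by
  simp [Nat.testBit, Nat.and_one_is_mod, Nat.one_and_eq_mod_two]

-- the fold in pvApply xors together exactly the columns at the set bits of x
lemma apply_colsOf (g : Nat → Nat) (hg : ∀ a b, g (a ^^^ b) = g a ^^^ g b) (x : Nat) :
    pvApply ((List.range 24).map fun i => ((g (2 ^ i) : Nat) : Int)) (x : Nat) =
      ((g (x % 16777216) : Nat) : Int) := by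
  have hz : g 0 = 0 := by have h := hg 0 0; simpa using h
  have aux : ∀ k, k ≤ 24 →
      (List.range k).foldl
        (fun y (i : Nat) =>
          if PySem.Int.band ((x : Int) >>> i) 1 == 1 then
            PySem.Int.bxor y (((List.range 24).map fun i => ((g (2 ^ i) : Nat) : Int)).getD i 0)
          else y) 0 = ((g (x % 2 ^ k) : Nat) : Int) := by
    intro k hk
    induction k with
    | zero => simp [Nat.mod_one, hz]
    | succ k ih =>
      set cs := (List.range 24).map (fun i => ((g (2 ^ i) : Nat) : Int)) with hcs
      rw [List.range_succ, List.foldl_append, ih (by omega), List.foldl_cons, List.foldl_nil]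
      have hget : cs.getD k 0 = ((g (2 ^ k) : Nat) : Int) := by
        simp [hcs, List.getD_eq_getElem?_getD, List.getElem?_map,
          List.getElem?_range (by omega : k < 24)]
      have hbeq : ∀ a b : Nat, (((a : Nat) : Int) == ((b : Nat) : Int)) = decide (a = b) := by
        intro a b; by_cases h : a = b <;> simp [h, beq_iff_eq]
      have hcond : (PySem.Int.band ((x : Int) >>> k) 1 == 1) = x.testBit k := by
        rw [← Int.natCast_shiftRight, show (1 : Int) = ((1 : Nat) : Int) from rfl, band_natCast',
          hbeq]
        by_cases hc : (x >>> k) &&& 1 = 1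
        · rw [decide_eq_true hc, (cond_iff x k).1 hc]
        · rw [decide_eq_false hc]
          rcases Bool.eq_false_or_eq_true (x.testBit k) with hb | hb
          · exact ((hc ((cond_iff x k).2 hb)).elim)
          · rw [hb]
      rw [hget, hcond, M1]
      by_cases hb : x.testBit k
      · simp only [hb, if_true, PySem.Int.bxor_natCast, hg]
      · simp [hb]
  have h24' := aux 24 le_rfl
  rw [pvApply]
  norm_num at h24' ⊢
  exact h24'

-- mapping pvApply over a matrix composes the two linear maps
lemma compose_colsOf (g h : Nat → Nat) (hg : ∀ a b, g (a ^^^ b) = g a ^^^ g b)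
    (hh : ∀ a, h a < 16777216) :
    ((List.range 24).map fun i => ((h (2 ^ i) : Nat) : Int)).map
        (pvApply ((List.range 24).map fun i => ((g (2 ^ i) : Nat) : Int))) =
      (List.range 24).map fun i => ((g (h (2 ^ i)) : Nat) : Int) := by
  rw [List.map_map]
  apply List.map_congr_left
  intro i _
  simp only [Function.comp_apply]
  rw [apply_colsOf g hg, Nat.mod_eq_of_lt (hh _)]

lemma iterate_two_mul (g : Nat → Nat) (k : Nat) (x : Nat) :
    (fun a => g (g a))^[k] x = g^[2 * k] x := by
  have h2 : (fun a => g (g a)) = g^[2] := by funext a; rfl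
  rw [h2, ← Function.iterate_mul]

-- square-and-multiply computes the e-th iterate of the linear map
lemma pow_colsOf (e : Nat) : ∀ (g : Nat → Nat) (x : Nat),
    (∀ a b, g (a ^^^ b) = g a ^^^ g b) → (∀ a, g a < 16777216) → x < 16777216 →
    pvPowLoop e ((List.range 24).map fun i => ((g (2 ^ i) : Nat) : Int)) (x : Nat) =
      ((g^[e] x : Nat) : Int) := by
  induction e using Nat.strong_induction_on with
  | _ e IH =>
    intro g x hg hb hx
    rw [pvPowLoop]
    by_cases he : e = 0
    · simp [he]
    · rw [if_neg he, compose_colsOf g g hg hb]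
      have hx' : (if e % 2 = 1 then
          pvApply ((List.range 24).map fun i => ((g (2 ^ i) : Nat) : Int)) (x : Nat)
          else ((x : Nat) : Int)) = ((g^[e % 2] x : Nat) : Int) := by
        by_cases hp : e % 2 = 1
        · rw [if_pos hp, apply_colsOf g hg, Nat.mod_eq_of_lt hx, hp]
          simp
        · rw [if_neg hp, show e % 2 = 0 by omega]
          simp
      rw [hx', IH (e / 2) (by omega) (fun a => g (g a)) (g^[e % 2] x)
        (fun a b => by show g (g (a ^^^ b)) = g (g a) ^^^ g (g b); rw [hg, hg])
        (fun a => hb _)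
        (by rcases Nat.lt_or_ge (e % 2) 1 with h | h
            · interval_cases (e % 2) <;> simp_all
            · have h1 : e % 2 = 1 := by omega
              rw [h1]; simpa using hb x)]
      rw [iterate_two_mul, ← Function.iterate_add_apply,
        show 2 * (e / 2) + e % 2 = e by omega]

-- A's fold over range(depth) is an iterate of the step
lemma fold_const_iterate (f : Int → Int) (l : List Int) (s : Int) :
    l.foldl (fun a _ => f a) s = f^[l.length] s := by
  induction l generalizing s with
  | nil => rfl
  | cons hd tl ih => simpa [Function.iterate_succ_apply] using ih (f s)

lemma iterate_step_cast (m : Nat) (t : Nat) (ht : t < 16777216) :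
    pvStep^[m] ((t : Nat) : Int) = ((natStep^[m] t : Nat) : Int) := by
  induction m generalizing t with
  | zero => rfl
  | succ m ih =>
    rw [Function.iterate_succ_apply, Function.iterate_succ_apply, step_cast t ht,
      ih (natStep t) (natStep_lt t)]

-- ===== VERDICT (by name: the statement is the Claim_ definition above) =====
theorem find_secret_spec : Claim_equal_find_secret := by
  intro secret depth _
  unfold Spec_find_secret
  by_cases hd : depth ≤ 0
  · rw [find_secret, find_secret_alt, if_pos hd, PySem.List.pyRange_one_eq_nil hd,
      List.foldl_nil]
  · have hfold : find_secret secret depth =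
        pvStep^[(PySem.List.pyRange 0 depth 1).length] secret := by
      rw [find_secret]
      exact fold_const_iterate pvStep _ secret
    set s0 : Nat := (secret % 16777216).toNat with hs0
    have hs0lt : s0 < 16777216 := by omega
    obtain ⟨m, hm⟩ : ∃ m, depth.toNat = m + 1 := ⟨depth.toNat - 1, by omega⟩
    have hA : find_secret secret depth = ((natStep^[m + 1] s0 : Nat) : Int) := by
      rw [hfold, PySem.List.length_pyRange_one, show depth - 0 = depth by ring, hm,
        Function.iterate_succ_apply, step_emod, ← hs0,
        iterate_step_cast m (natStep s0) (natStep_lt s0), ← Function.iterate_succ_apply]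
    have hcols : (List.range 24).map (fun (i : Nat) => pvStep ((1 : Int) <<< i)) =
        (List.range 24).map (fun i => ((natStep (2 ^ i) : Nat) : Int)) := by
      apply List.map_congr_left
      intro i hi
      have hi24 : i < 24 := List.mem_range.1 hi
      have h1 : ((1 : Int) <<< i) = ((2 ^ i : Nat) : Int) := by
        rw [show (2 ^ i : Nat) = 1 <<< i by rw [Nat.shiftLeft_eq]; ring,
          Int.natCast_shiftLeft]
        norm_num
      rw [h1, step_cast (2 ^ i)
        (by calc 2 ^ i < 2 ^ 24 := Nat.pow_lt_pow_right (by norm_num) hi24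
             _ = 16777216 := by norm_num)]
    have hmod : PySem.Int.mod secret 16777216 = ((s0 : Nat) : Int) := by
      rw [PySem.Int.mod_eq_emod_of_pos (by norm_num)]
      omega
    rw [hA, find_secret_alt, if_neg hd, hcols, hmod,
      pow_colsOf depth.toNat natStep s0 natStep_lin natStep_lt hs0lt, hm]
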